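-- pv_equiv track=rewrite | github.com/Hu1J/supercc | cc_feishu_bridge/skill_nudge.py | _parse_skill_meta
-- ===== SOURCE A (Python) =====
-- def _parse_skill_meta(content: str) -> tuple[str, str, str]:
--     """Returns (name, description, author) from SKILL.md frontmatter."""
--     name, description, author = "", "", ""
--     if content.startswith("---"):
--         parts = content.split("---", 2)
--         if len(parts) >= 3:
--             for line in parts[1].splitlines():
--                 if line.startswith("name:"):
--                     name = line.split("name:", 1)[1].strip()
--                 elif line.startswith("description:"):
--                     description = line.split("description:", 1)[1].strip()
--                 elif line.startswith("author:"):
--                     author = line.split("author:", 1)[1].strip()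
--     return name, description, author
-- ===== SOURCE B (Python) =====
-- def _parse_skill_meta(content: str) -> tuple[str, str, str]:
--     """Returns (name, description, author) from SKILL.md frontmatter."""
--     if content.startswith("---"):
--         parts = content.split("---", 2)
--         if len(parts) >= 3:
--             d = {}
--             for line in parts[1].splitlines():
--                 pieces = line.split(":", 1)
--                 if len(pieces) == 2:
--                     d[pieces[0]] = pieces[1].strip()
--             return d.get("name", ""), d.get("description", ""), d.get("author", "")
--     return "", "", ""
-- ===== Notes on version B (the rewrite author's own statement) =====
-- stated objective: simpler
-- what changed: Replaces A's per-line startswith/elif prefix-test chain and three mutable variables by a single first-colon split of each line into a dict (raw pre-colon text as key, stripped remainder as value, last occurrence wins) followed by three d.get lookups at the end.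
import Mathlib
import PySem

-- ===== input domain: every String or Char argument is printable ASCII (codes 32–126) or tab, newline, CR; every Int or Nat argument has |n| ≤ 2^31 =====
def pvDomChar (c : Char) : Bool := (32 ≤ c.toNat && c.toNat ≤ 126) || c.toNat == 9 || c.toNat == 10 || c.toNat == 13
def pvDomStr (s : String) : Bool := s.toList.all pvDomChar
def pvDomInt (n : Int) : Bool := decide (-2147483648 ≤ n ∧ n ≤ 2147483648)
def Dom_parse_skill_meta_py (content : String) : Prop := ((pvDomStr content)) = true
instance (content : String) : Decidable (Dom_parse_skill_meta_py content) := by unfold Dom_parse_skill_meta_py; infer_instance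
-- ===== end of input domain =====

-- B replaces A's per-line startswith/elif chain by one first-colon split into a dict and three lookups at the end
-- (objective: simpler; same cost).

-- ===== PORT A =====
def pa_line_step (acc : String × String × String) (line : String) : String × String × String :=
  if PySem.Str.startswith line "name:" then
    (PySem.Str.strip (PySem.List.pyGetD ((PySem.Str.splitMax? line "name:" 1).getD []) 1 ""), acc.2.1, acc.2.2)
  else if PySem.Str.startswith line "description:" then
    (acc.1, PySem.Str.strip (PySem.List.pyGetD ((PySem.Str.splitMax? line "description:" 1).getD []) 1 ""), acc.2.2)
  else if PySem.Str.startswith line "author:" then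
    (acc.1, acc.2.1, PySem.Str.strip (PySem.List.pyGetD ((PySem.Str.splitMax? line "author:" 1).getD []) 1 ""))
  else acc

def parse_skill_meta_py (content : String) : String × String × String :=
  let init : String × String × String := ("", "", "")
  if PySem.Str.startswith content "---" then
    let parts := (PySem.Str.splitMax? content "---" 2).getD []
    if parts.length ≥ 3 then
      (PySem.Str.splitlines (PySem.List.pyGetD parts 1 "")).foldl pa_line_step init
    else init
  else init

-- ===== PORT B =====
def pb_dict_step (d : PySem.Dict String String) (line : String) : PySem.Dict String String :=
  let pieces := (PySem.Str.splitMax? line ":" 1).getD []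
  if pieces.length = 2 then
    d.insert (PySem.List.pyGetD pieces 0 "") (PySem.Str.strip (PySem.List.pyGetD pieces 1 ""))
  else d

def parse_skill_meta_py_alt (content : String) : String × String × String :=
  if PySem.Str.startswith content "---" then
    let parts := (PySem.Str.splitMax? content "---" 2).getD []
    if parts.length ≥ 3 then
      let d := (PySem.Str.splitlines (PySem.List.pyGetD parts 1 "")).foldl pb_dict_step PySem.Dict.empty
      (d.getD "name" "", d.getD "description" "", d.getD "author" "")
    else ("", "", "")
  else ("", "", "")

-- ===== PRECONDITION & SPEC =====
def Spec_parse_skill_meta_py (content : String) (out : String × String × String) : Prop := out = parse_skill_meta_py_alt content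
instance (content : String) (out : String × String × String) : Decidable (Spec_parse_skill_meta_py content out) := by unfold Spec_parse_skill_meta_py; infer_instance

-- ===== CLAIM (what is proved, stated in full; the proofs are below) =====
def Claim_equal_parse_skill_meta_py : Prop := ∀ (content : String), Dom_parse_skill_meta_py content → Spec_parse_skill_meta_py content (parse_skill_meta_py content)

-- ===== LEMMAS AND PROOFS =====

-- splitOnMax.go with maxsplit exhausted keeps the rest of the line whole
lemma pv_go_zero (sep : List Char) (fuel : Nat) (l cur : List Char) (acc : List (List Char)) :
    PySem.Chars.splitOnMax.go sep fuel 0 l cur acc = ((cur.reverse ++ l) :: acc).reverse := by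
  cases fuel <;> cases l <;> simp [PySem.Chars.splitOnMax.go]

-- s.split(p, 1) when s starts with p
lemma pv_splitOnMax_prefix (p r : List Char) (hp : p ≠ []) :
    PySem.Chars.splitOnMax (p ++ r) p 1 = [[], r] := by
  cases p with
  | nil => exact absurd rfl hp
  | cons c p' =>
    show PySem.Chars.splitOnMax.go (c :: p') ((c :: p' ++ r).length + 1) 1 (c :: (p' ++ r)) [] [] = [[], r]
    have hlen : (c :: p' ++ r).length + 1 = (p' ++ r).length + 1 + 1 := by simp
    rw [hlen]
    have hpre : (c :: p').isPrefixOf (c :: (p' ++ r)) = true :=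
      List.isPrefixOf_iff_prefix.mpr (List.prefix_append _ _)
    simp [PySem.Chars.splitOnMax.go, hpre, pv_go_zero, List.drop_left']

-- s.split(":", 1) on a line with no colon
lemma pv_go_colon_no (l : List Char) (fuel : Nat) (cur : List Char) (acc : List (List Char))
    (h : l.length < fuel) (hn : ':' ∉ l) :
    PySem.Chars.splitOnMax.go [':'] fuel 1 l cur acc = acc.reverse ++ [cur.reverse ++ l] := by
  induction l generalizing fuel cur acc with
  | nil =>
    cases fuel with
    | zero => omega
    | succ f => simp [PySem.Chars.splitOnMax.go]
  | cons c rest ih =>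
    cases fuel with
    | zero => omega
    | succ f =>
      have hc : ¬ (':' == c) := by
        simp only [beq_iff_eq]
        intro hh; exact hn (by simp [← hh])
      have hrest : ':' ∉ rest := fun hm => hn (List.mem_cons_of_mem _ hm)
      simp only [PySem.Chars.splitOnMax.go, List.isPrefixOf, hc, Bool.false_and]
      rw [show (1 : Nat) = 0 + 1 by rfl] at *
      simpa using ih f (c :: cur) acc (by simpa using Nat.lt_of_succ_lt_succ h) hrest

-- s.split(":", 1) on a line whose first colon splits it as a ++ ':' :: b
lemma pv_go_colon_yes (a b : List Char) (fuel : Nat) (cur : List Char) (acc : List (List Char))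
    (h : (a ++ ':' :: b).length < fuel) (ha : ':' ∉ a) :
    PySem.Chars.splitOnMax.go [':'] fuel 1 (a ++ ':' :: b) cur acc
      = acc.reverse ++ [cur.reverse ++ a, b] := by
  induction a generalizing fuel cur acc with
  | nil =>
    cases fuel with
    | zero => simp at h
    | succ f =>
      simp only [List.nil_append]
      have hpre : [':'].isPrefixOf (':' :: b) = true := by simp [List.isPrefixOf]
      simp [PySem.Chars.splitOnMax.go, hpre, pv_go_zero]
  | cons c a' ih =>
    cases fuel with
    | zero => simp at h
    | succ f =>
      have hc : ¬ (':' == c) := by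
        simp only [beq_iff_eq]
        intro hh; exact ha (by simp [← hh])
      have ha' : ':' ∉ a' := fun hm => ha (List.mem_cons_of_mem _ hm)
      simp only [List.cons_append, PySem.Chars.splitOnMax.go, List.isPrefixOf, hc,
        Bool.false_and]
      rw [ih f (c :: cur) acc (by simp at h ⊢; omega) ha']
      simp

-- s.split(":", 1) at the Chars level
lemma pv_splitOnMax_colon_yes (a b : List Char) (ha : ':' ∉ a) :
    PySem.Chars.splitOnMax (a ++ ':' :: b) [':'] 1 = [a, b] := by
  show PySem.Chars.splitOnMax.go [':'] ((a ++ ':' :: b).length + 1) 1 (a ++ ':' :: b) [] [] = [a, b]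
  simpa using pv_go_colon_yes a b ((a ++ ':' :: b).length + 1) [] [] (by omega) ha

lemma pv_splitOnMax_colon_no (l : List Char) (hc : ':' ∉ l) :
    PySem.Chars.splitOnMax l [':'] 1 = [l] := by
  show PySem.Chars.splitOnMax.go [':'] (l.length + 1) 1 l [] [] = [l]
  simpa using pv_go_colon_no l (l.length + 1) [] [] (by omega) hc

-- first-colon decompositions are unique
lemma pv_colon_decomp_unique (a : List Char) : ∀ (key b t : List Char), ':' ∉ a → ':' ∉ key →
    a ++ ':' :: b = key ++ ':' :: t → a = key := by
  induction a with
  | nil =>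
    intro key b t _ hk he
    cases key with
    | nil => rfl
    | cons y k' =>
      simp only [List.nil_append, List.cons_append, List.cons.injEq] at he
      exact absurd (List.mem_cons.mpr (Or.inl he.1)) hk
  | cons x a' ih =>
    intro key b t ha hk he
    cases key with
    | nil =>
      simp only [List.cons_append, List.nil_append, List.cons.injEq] at he
      exact absurd (List.mem_cons.mpr (Or.inl he.1.symm)) ha
    | cons y k' =>
      simp only [List.cons_append, List.cons.injEq] at he
      have := ih k' b t (fun hm => ha (List.mem_cons_of_mem _ hm))
        (fun hm => hk (List.mem_cons_of_mem _ hm)) he.2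
      rw [he.1, this]

-- 'line.startswith(key + ":")' on a line whose first colon splits it as a ++ ':' :: b
lemma pv_key_prefix (key a b : List Char) (hk : ':' ∉ key) (ha : ':' ∉ a) :
    (key ++ [':']).isPrefixOf (a ++ ':' :: b) = decide (a = key) := by
  by_cases h : a = key
  · rw [h]
    have hpre : (key ++ [':']).isPrefixOf (key ++ ':' :: b) = true :=
      List.isPrefixOf_iff_prefix.mpr ⟨b, by simp⟩
    simp [hpre]
  · simp only [h, decide_false]
    rw [Bool.eq_false_iff]
    intro hpre
    obtain ⟨t, ht⟩ := List.isPrefixOf_iff_prefix.mp hpre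
    exact h (pv_colon_decomp_unique a key b t ha hk (by simpa using ht.symm))

-- every line has either no colon or a unique first-colon decomposition
lemma pv_colon_split (l : List Char) (h : ':' ∈ l) :
    ∃ a b, l = a ++ ':' :: b ∧ ':' ∉ a := by
  induction l with
  | nil => cases h
  | cons c rest ih =>
    by_cases hc : c = ':'
    · exact ⟨[], rest, by simp [hc], by simp⟩
    · obtain ⟨a, b, hl, ha⟩ := ih (by
        rcases List.mem_cons.mp h with h1 | h2
        · exact absurd h1.symm hc
        · exact h2)
      exact ⟨c :: a, b, by simp [hl], by
        intro hm
        rcases List.mem_cons.mp hm with h1 | h2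
        · exact hc h1.symm
        · exact ha h2⟩

-- the per-line bodies agree: A's three-variable update equals B's dict update read back through the three lookups
lemma pv_step_line (d : PySem.Dict String String) (line : String) :
    pa_line_step (d.getD "name" "", d.getD "description" "", d.getD "author" "") line
      = ((pb_dict_step d line).getD "name" "", (pb_dict_step d line).getD "description" "",
         (pb_dict_step d line).getD "author" "") := by
  by_cases hc : ':' ∈ line.toList
  · obtain ⟨a, b, hl, ha⟩ := pv_colon_split line.toList hc
    have hBsplit : PySem.Chars.splitOnMax line.toList [':'] 1 = [a, b] := by
      rw [hl]; exact pv_splitOnMax_colon_yes a b ha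
    have hB : pb_dict_step d line
        = d.insert (String.ofList a) (PySem.Str.strip (String.ofList b)) := by
      unfold pb_dict_step
      simp [PySem.Str.splitMax?, PySem.Chars.splitMax?, hBsplit, PySem.List.pyGetD_ofNat']
    have hsw : ∀ (keyc : String) (key : List Char), keyc.toList = key ++ [':'] → ':' ∉ key →
        PySem.Str.startswith line keyc = decide (a = key) := by
      intro keyc key hkc hk
      rw [PySem.Str.startswith_eq, hkc, hl]
      exact pv_key_prefix key a b hk ha
    have hval : ∀ (keyc : String) (key : List Char), keyc.toList = key ++ [':'] → a = key →
        PySem.Str.strip (PySem.List.pyGetD ((PySem.Str.splitMax? line keyc 1).getD []) 1 "")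
          = PySem.Str.strip (String.ofList b) := by
      intro keyc key hkc hak
      have hlk : line.toList = keyc.toList ++ b := by rw [hl, hak, hkc]; simp
      have : PySem.Chars.splitOnMax line.toList keyc.toList 1 = [[], b] := by
        rw [hlk]; exact pv_splitOnMax_prefix _ _ (by rw [hkc]; simp)
      simp [PySem.Str.splitMax?, PySem.Chars.splitMax?, this, PySem.List.pyGetD_ofNat',
        show keyc.toList.isEmpty = false by rw [hkc]; simp]
    have hofa : ∀ key : List Char, (String.ofList a = String.ofList key) ↔ a = key := by
      intro key
      constructor
      · intro h; have := congrArg String.toList h; simpa using this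
      · intro h; rw [h]
    unfold pa_line_step
    by_cases hn : a = "name".toList
    · rw [hsw "name:" "name".toList rfl (by decide)]
      simp only [hn, decide_true, if_true]
      rw [hval "name:" "name".toList rfl hn, hB]
      have : String.ofList a = "name" := by rw [hn]; rfl
      rw [this]
      simp [PySem.Dict.getD_insert]
    · by_cases hd : a = "description".toList
      · rw [hsw "name:" "name".toList rfl (by decide),
          hsw "description:" "description".toList rfl (by decide)]
        simp only [hd, decide_true, if_true]
        rw [hval "description:" "description".toList rfl hd, hB]
        have : String.ofList a = "description" := by rw [hd]; rfl
        rw [this]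
        simp [PySem.Dict.getD_insert]
      · by_cases hau : a = "author".toList
        · rw [hsw "name:" "name".toList rfl (by decide),
            hsw "description:" "description".toList rfl (by decide),
            hsw "author:" "author".toList rfl (by decide)]
          simp only [hau, decide_true, if_true]
          rw [hval "author:" "author".toList rfl hau, hB]
          have : String.ofList a = "author" := by rw [hau]; rfl
          rw [this]
          simp [PySem.Dict.getD_insert]
        · rw [hsw "name:" "name".toList rfl (by decide),
            hsw "description:" "description".toList rfl (by decide),
            hsw "author:" "author".toList rfl (by decide)]
          simp only [hn, hd, hau, decide_false, Bool.false_eq_true, if_false]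
          rw [hB]
          have h1 : ¬ (("name" : String) = String.ofList a) := fun h =>
            hn ((hofa "name".toList).mp h.symm)
          have h2 : ¬ (("description" : String) = String.ofList a) := fun h =>
            hd ((hofa "description".toList).mp h.symm)
          have h3 : ¬ (("author" : String) = String.ofList a) := fun h =>
            hau ((hofa "author".toList).mp h.symm)
          rw [PySem.Dict.getD_insert, PySem.Dict.getD_insert, PySem.Dict.getD_insert]
          simp [h1, h2, h3]
  · -- no colon in the line: A's three startswith tests all fail, B stores nothing
    have hBsplit : PySem.Chars.splitOnMax line.toList [':'] 1 = [line.toList] :=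
      pv_splitOnMax_colon_no line.toList hc
    have hB : pb_dict_step d line = d := by
      unfold pb_dict_step
      simp [PySem.Str.splitMax?, PySem.Chars.splitMax?, hBsplit]
    have hsw : ∀ keyc : String, ':' ∈ keyc.toList → PySem.Str.startswith line keyc = false := by
      intro keyc hk
      simp only [PySem.Str.startswith_eq, PySem.Chars.startswith]
      rw [Bool.eq_false_iff]
      intro hpre
      exact hc ((List.isPrefixOf_iff_prefix.mp hpre).subset hk)
    unfold pa_line_step
    rw [hsw "name:" (by decide), hsw "description:" (by decide), hsw "author:" (by decide), hB]
    simp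

-- the whole loop: A's fold of the triple equals the three lookups in B's folded dict
lemma pv_fold_inv (lines : List String) (d : PySem.Dict String String) :
    lines.foldl pa_line_step (d.getD "name" "", d.getD "description" "", d.getD "author" "")
      = ((lines.foldl pb_dict_step d).getD "name" "", (lines.foldl pb_dict_step d).getD "description" "",
         (lines.foldl pb_dict_step d).getD "author" "") := by
  induction lines generalizing d with
  | nil => rfl
  | cons line rest ih =>
    simp only [List.foldl_cons]
    rw [pv_step_line]
    exact ih (pb_dict_step d line)

-- ===== VERDICT (by name: the statement is the Claim_ definition above) =====
theorem parse_skill_meta_py_spec : Claim_equal_parse_skill_meta_py := by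
  intro content _
  unfold Spec_parse_skill_meta_py parse_skill_meta_py parse_skill_meta_py_alt
  by_cases h1 : PySem.Str.startswith content "---" <;> simp only [h1, if_true, if_false, Bool.false_eq_true]
  by_cases h2 : ((PySem.Str.splitMax? content "---" 2).getD []).length ≥ 3 <;>
    simp only [h2, if_true, if_false]
  have := pv_fold_inv
    (PySem.Str.splitlines (PySem.List.pyGetD ((PySem.Str.splitMax? content "---" 2).getD []) 1 ""))
    PySem.Dict.empty
  simpa [PySem.Dict.getD_empty] using this
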